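-- pv_equiv track=rewrite | github.com/wnstj-yang/Algorithm | Programmers/programmers_[3차] n진수 게임.py | solution
-- ===== SOURCE A (Python) =====
-- def trans_number(n, number):
--     num_over_ten = {
--         10: 'A', 11: 'B', 12: 'C',
--         13: 'D', 14: 'E', 15: 'F',
--     }
--     temp = ''  # 숫자를 n진법으로 만든 수
--     if number == 0:
--         temp = '0'
--     while number != 0:
--         remainder = number % n
--         if remainder in num_over_ten:
--             temp = str(num_over_ten[remainder]) + temp
--         else:
--             temp = str(remainder) + temp
--         number = number // n
--
--     return temp
--
-- def solution(n, t, m, p):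
--     answer = ''
--     num = 0
--     # m명 만큼 한 바퀴를 돌면서 t개가 있어야 하니 길이가 m * t보다 작아야함. 크거나 같으면 t초과
--     result = ''
--     while len(result) < m * t:
--         # 숫자를 0부터 시작해서 각 해당 숫자의 n진법 수를 구한다.
--         result += trans_number(n, num)
--         num += 1
--
--     for idx in range(len(result)):
--         # 길이가 완성되면 끝
--         if len(answer) == t:
--             break
--         # 사람 명수를 나머지 연산을 통해 튜브가 구할 숫자를 택
--         if idx % m == p - 1:
--             answer += result[idx]
--
--     return answer
-- ===== SOURCE B (Python) =====
-- def solution(n, t, m, p):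
--     num_over_ten = {
--         10: 'A', 11: 'B', 12: 'C',
--         13: 'D', 14: 'E', 15: 'F',
--     }
--
--     def digits(number):
--         # base-n representation, identical digit rule as the original helper
--         if number == 0:
--             return '0'
--         temp = ''
--         while number != 0:
--             r = number % n
--             temp = (num_over_ten[r] if r in num_over_ten else str(r)) + temp
--             number //= n
--         return temp
--
--     # stream: never materialise the full result string; pos is the global index
--     answer = []
--     pos = 0
--     num = 0
--     while pos < m * t:
--         for ch in digits(num):
--             if pos % m == p - 1:
--                 answer.append(ch)
--                 if len(answer) == t:
--                     return ''.join(answer)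
--             pos += 1
--         num += 1
--     return ''.join(answer)
-- ===== Notes on version B (the rewrite author's own statement) =====
-- stated objective: simpler
-- what changed: B streams the base-n digit strings as they are generated, selecting player p's characters with a single global position counter and returning as soon as t characters are collected, instead of A's two-phase build-the-whole-result-string-then-rescan-it-by-index.
import Mathlib
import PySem

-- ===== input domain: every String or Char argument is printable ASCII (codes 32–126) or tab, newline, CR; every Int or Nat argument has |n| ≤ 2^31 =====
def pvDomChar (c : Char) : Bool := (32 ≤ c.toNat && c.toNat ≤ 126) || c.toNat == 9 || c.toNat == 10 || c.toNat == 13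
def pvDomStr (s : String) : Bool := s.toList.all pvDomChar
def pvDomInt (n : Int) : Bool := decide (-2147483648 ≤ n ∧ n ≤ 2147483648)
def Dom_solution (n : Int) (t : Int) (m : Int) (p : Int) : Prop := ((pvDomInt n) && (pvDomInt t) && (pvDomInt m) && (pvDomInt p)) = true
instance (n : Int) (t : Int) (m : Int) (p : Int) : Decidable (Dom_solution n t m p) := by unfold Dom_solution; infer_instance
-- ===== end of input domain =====

-- B streams the generated digits with one global position counter and an early return,
-- instead of materialising the full `result` string and re-scanning it (objective: simpler).

-- ===== PORT A =====
-- the dict num_over_ten of trans_number (shared by both ports: Source B reuses the same digit table)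
def numOverTen : PySem.Dict Int (List Char) :=
  PySem.Dict.ofList [(10, ['A']), (11, ['B']), (12, ['C']), (13, ['D']), (14, ['E']), (15, ['F'])]

-- the loop body's digit: num_over_ten[remainder] if present else str(remainder)
def transDigit (n : Int) (number : Int) : List Char :=
  match PySem.Dict.get? numOverTen (PySem.Int.mod number n) with
  | some s => s
  | none => PySem.Int.toChars (PySem.Int.mod number n)

-- termination measure for the `while number != 0` loop of trans_number
def transMu (x : Int) : Nat := 2 * x.natAbs + (if 0 < x then 1 else 0)

-- the while-loop of trans_number; the `if h : …` guard only makes the recursion total: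
-- it holds whenever the Python loop makes progress (it fails only for n ∈ {-1,0,1}, where
-- the Python raises or diverges — outside Pre_)
def transLoop (n : Int) (number : Int) (temp : List Char) : List Char :=
  if number = 0 then temp
  else if h : transMu (PySem.Int.floordiv number n) < transMu number then
    transLoop n (PySem.Int.floordiv number n) (transDigit n number ++ temp)
  else transDigit n number ++ temp
termination_by transMu number
decreasing_by exact h

-- trans_number(n, number): 'if number == 0: temp = "0"' and then the loop does not run
def transNumber (n : Int) (number : Int) : List Char :=
  if number = 0 then ['0'] else transLoop n number []

-- the `while len(result) < m * t: result += trans_number(n, num); num += 1` loop;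
-- the inner `≠ []` guard is a totality guard only (always true, transNumber_ne_nil)
def buildResult (n : Int) (mt : Int) (result : List Char) (num : Int) : List Char :=
  if h1 : (result.length : Int) < mt then
    if h2 : transNumber n num ≠ [] then
      buildResult n mt (result ++ transNumber n num) (num + 1)
    else result
  else result
termination_by (mt - result.length).toNat
decreasing_by
  simp only [List.length_append]
  have : 1 ≤ (transNumber n num).length := List.length_pos_iff.mpr h2
  omega

-- the `for idx in range(len(result))` selection loop with its break
def selectLoop (m p t : Int) (result : List Char) (idxs : List Int) (answer : List Char) : List Char :=
  match idxs with
  | [] => answer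
  | idx :: rest =>
    if (answer.length : Int) = t then answer
    else if PySem.Int.mod idx m = p - 1 then
      selectLoop m p t result rest (answer ++ [PySem.List.pyGetD result idx ' '])
    else selectLoop m p t result rest answer

def solution (n : Int) (t : Int) (m : Int) (p : Int) : String :=
  String.ofList (selectLoop m p t (buildResult n (m * t) [] 0)
    (PySem.List.pyRange 0 ((buildResult n (m * t) [] 0).length : Int) 1) [])

-- ===== PORT B =====
-- Source B's inner `for ch in digits(num)` loop: returns (answer, pos, done);
-- done = true is the early `return` once len(answer) == t
def scanPiece (m p t : Int) (cs : List Char) (answer : List Char) (pos : Int) :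
    List Char × Int × Bool :=
  match cs with
  | [] => (answer, pos, false)
  | c :: rest =>
    if PySem.Int.mod pos m = p - 1 then
      if ((answer ++ [c]).length : Int) = t then (answer ++ [c], pos, true)
      else scanPiece m p t rest (answer ++ [c]) (pos + 1)
    else scanPiece m p t rest answer (pos + 1)

-- the position counter advances by exactly the piece length when no early return fired
-- (needed by loopB's termination)
theorem scanPiece_pos (m p t : Int) (cs : List Char) (answer : List Char) (pos : Int)
    (h : (scanPiece m p t cs answer pos).2.2 = false) :
    (scanPiece m p t cs answer pos).2.1 = pos + cs.length := by
  induction cs generalizing answer pos with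
  | nil => simp [scanPiece]
  | cons c rest ih =>
    rw [scanPiece] at h ⊢
    by_cases hc1 : PySem.Int.mod pos m = p - 1
    · rw [if_pos hc1] at h ⊢
      by_cases hc2 : (((answer ++ [c]).length : Nat) : Int) = t
      · rw [if_pos hc2] at h
        simp at h
      · rw [if_neg hc2] at h ⊢
        rw [ih _ _ h]
        simp only [List.length_cons]
        push_cast
        ring
    · rw [if_neg hc1] at h ⊢
      rw [ih _ _ h]
      simp only [List.length_cons]
      push_cast
      ring

-- Source B's outer while loop (Source B reuses trans_number's digit rule; same totality guard as port A)
def loopB (n : Int) (t : Int) (m : Int) (p : Int) (answer : List Char) (pos : Int) (num : Int) : List Char :=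
  if h1 : pos < m * t then
    if h2 : transNumber n num ≠ [] then
      if hr : (scanPiece m p t (transNumber n num) answer pos).2.2 = true then
        (scanPiece m p t (transNumber n num) answer pos).1
      else
        loopB n t m p (scanPiece m p t (transNumber n num) answer pos).1
          (scanPiece m p t (transNumber n num) answer pos).2.1 (num + 1)
    else answer
  else answer
termination_by (m * t - pos).toNat
decreasing_by
  have hp := scanPiece_pos m p t (transNumber n num) answer pos (by simpa using hr)
  have : 1 ≤ (transNumber n num).length := List.length_pos_iff.mpr h2
  omega

def solution_alt (n : Int) (t : Int) (m : Int) (p : Int) : String :=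
  String.ofList (loopB n t m p [] 0 0)

-- ===== PRECONDITION & SPEC =====
-- Pre_ excludes exactly the inputs where Python A does not return: for n ∈ {-1,0,1} and
-- m*t ≥ 2 trans_number(n, 1) raises ZeroDivisionError (n = 0) or loops forever (n = ±1).
def Pre_solution (n : Int) (t : Int) (m : Int) (p : Int) : Prop :=
  2 ≤ n ∨ n ≤ -2 ∨ m * t ≤ 1
instance (n : Int) (t : Int) (m : Int) (p : Int) : Decidable (Pre_solution n t m p) := by
  unfold Pre_solution; infer_instance

def pvWitness_solution : Int × Int × Int × Int := (2, 4, 2, 1)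

def Spec_solution (n : Int) (t : Int) (m : Int) (p : Int) (out : String) : Prop := out = solution_alt n t m p
instance (n : Int) (t : Int) (m : Int) (p : Int) (out : String) : Decidable (Spec_solution n t m p out) := by unfold Spec_solution; infer_instance

-- ===== CLAIM (what is proved, stated in full; the proofs are below) =====
def Claim_equal_solution : Prop := ∀ (n : Int) (t : Int) (m : Int) (p : Int), Dom_solution n t m p → Pre_solution n t m p → Spec_solution n t m p (solution n t m p)

-- ===== LEMMAS AND PROOFS =====

theorem transDigit_ne_nil (n number : Int) : transDigit n number ≠ [] := by
  unfold transDigit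
  rcases hd : PySem.Dict.get? numOverTen (PySem.Int.mod number n) with _ | s
  · simp only [PySem.Int.toChars]
    split
    · simp
    · intro hnil
      have hpos : 0 < (Nat.toDigits 10 (PySem.Int.mod number n).toNat).length :=
        Nat.length_toDigits_pos
      rw [hnil] at hpos
      simp at hpos
  · have hm := PySem.Dict.mem_items_of_get?_eq_some numOverTen hd
    have hitems : numOverTen.items =
        [(10, ['A']), (11, ['B']), (12, ['C']), (13, ['D']), (14, ['E']), (15, ['F'])] := by
      decide
    rw [hitems] at hm
    simp only [List.mem_cons, List.not_mem_nil, or_false, Prod.mk.injEq] at hm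
    rcases hm with ⟨_, h⟩ | ⟨_, h⟩ | ⟨_, h⟩ | ⟨_, h⟩ | ⟨_, h⟩ | ⟨_, h⟩ <;> subst h <;> simp

-- nonemptiness of a piece, needed by the outer while-loops' termination guards
theorem transLoop_ne_nil (n number : Int) (temp : List Char)
    (h : number ≠ 0 ∨ temp ≠ []) : transLoop n number temp ≠ [] := by
  unfold transLoop
  split
  · rcases h with h | h
    · exact absurd ‹number = 0› h
    · exact h
  · split
    · exact transLoop_ne_nil n _ _ (Or.inr (by simp [transDigit_ne_nil]))
    · simp [transDigit_ne_nil]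
termination_by transMu number
decreasing_by assumption

theorem transNumber_ne_nil (n number : Int) : transNumber n number ≠ [] := by
  unfold transNumber
  split
  · simp
  · exact transLoop_ne_nil n number [] (Or.inl ‹¬ number = 0›)


-- proof-side: the stream of characters A's build loop appends after position pos
def genFrom (n : Int) (mt : Int) (pos : Int) (num : Int) : List Char :=
  if h1 : pos < mt then
    transNumber n num ++ genFrom n mt (pos + (transNumber n num).length) (num + 1)
  else []
termination_by (mt - pos).toNat
decreasing_by
  have : 1 ≤ (transNumber n num).length := List.length_pos_iff.mpr (transNumber_ne_nil n num)
  omega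

theorem buildResult_eq_genFrom (n mt : Int) (result : List Char) (num : Int) :
    buildResult n mt result num = result ++ genFrom n mt (result.length : Int) num := by
  unfold buildResult genFrom
  split
  · simp only [transNumber_ne_nil n num, ne_eq, not_false_eq_true, dite_true]
    rw [buildResult_eq_genFrom]
    simp
  · simp
termination_by (mt - result.length).toNat
decreasing_by
  simp only [List.length_append]
  have : 1 ≤ (transNumber n num).length := List.length_pos_iff.mpr (transNumber_ne_nil n num)
  omega

-- proof-side: A's selection loop as a walk over the characters with a position counter
def sel (m p t : Int) (cs : List Char) (pos : Int) (answer : List Char) : List Char :=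
  match cs with
  | [] => answer
  | c :: rest =>
    if (answer.length : Int) = t then answer
    else if PySem.Int.mod pos m = p - 1 then sel m p t rest (pos + 1) (answer ++ [c])
    else sel m p t rest (pos + 1) answer

theorem selectLoop_eq_sel (m p t : Int) (result : List Char) (k : Nat) (answer : List Char)
    (cs : List Char) (hk : result.drop k = cs) :
    selectLoop m p t result (PySem.List.pyRange (k : Int) (result.length : Int) 1) answer
      = sel m p t cs (k : Int) answer := by
  induction cs generalizing k answer with
  | nil =>
    have hlen : result.length ≤ k := by
      by_contra hc
      have := List.drop_eq_nil_iff.mp hk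
      omega
    rw [PySem.List.pyRange_one_eq_nil (by exact_mod_cast hlen)]
    simp [selectLoop, sel]
  | cons c rest ih =>
    have hklt : k < result.length := by
      by_contra hc
      rw [List.drop_eq_nil_of_le (by omega)] at hk
      simp at hk
    rw [PySem.List.pyRange_one_cons (by exact_mod_cast hklt)]
    simp only [selectLoop, sel]
    have hget : PySem.List.pyGetD result (k : Int) ' ' = c := by
      rw [PySem.List.pyGetD_natCast]
      have h0 : (result.drop k)[0]? = some c := by rw [hk]; rfl
      rw [List.getElem?_drop] at h0
      simp only [Nat.add_zero] at h0
      simp [List.getD, h0]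
    have hk1 : result.drop (k + 1) = rest := by
      have hdd : result.drop (k + 1) = (result.drop k).drop 1 := by
        rw [List.drop_drop]
      rw [hdd, hk]; rfl
    have hcast : (k : Int) + 1 = ((k + 1 : Nat) : Int) := by push_cast; ring
    split
    · rfl
    · split
      · rw [hget, hcast, ih (k + 1) _ hk1]
      · rw [hcast, ih (k + 1) _ hk1]

-- once the answer has reached length t, A's selection walk is finished
theorem sel_of_len_eq (m p t : Int) (cs : List Char) (pos : Int) (answer : List Char)
    (h : (answer.length : Int) = t) : sel m p t cs pos answer = answer := by
  cases cs with
  | nil => rfl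
  | cons c rest => simp [sel, h]

-- the walk over a concatenation factors through scanPiece, as long as the answer has
-- not yet reached length t (len < t, or t < 0 and it never will)
theorem sel_append (m p t : Int) (cs rest : List Char) (pos : Int) (answer : List Char)
    (H : (answer.length : Int) < t ∨ t < 0) :
    sel m p t (cs ++ rest) pos answer =
      (if (scanPiece m p t cs answer pos).2.2
        then (scanPiece m p t cs answer pos).1
        else sel m p t rest (scanPiece m p t cs answer pos).2.1 (scanPiece m p t cs answer pos).1) ∧
    ((scanPiece m p t cs answer pos).2.2 = false →
      ((((scanPiece m p t cs answer pos).1).length : Int) < t ∨ t < 0)) := by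
  induction cs generalizing pos answer with
  | nil => simpa [scanPiece, sel] using H
  | cons c cs' ih =>
    have hne : ¬ (answer.length : Int) = t := by omega
    simp only [List.cons_append, sel, scanPiece, hne, if_false]
    split
    · by_cases ht : (((answer ++ [c]).length : Int)) = t
      · simp only [ht, if_true]
        constructor
        · exact sel_of_len_eq m p t (cs' ++ rest) (pos + 1) (answer ++ [c]) ht
        · intro hf; simp at hf
      · simp only [ht, if_false]
        exact ih (pos + 1) (answer ++ [c]) (by simp at ht ⊢; omega)
    · exact ih (pos + 1) answer H

-- the main fusion invariant: B's streaming loop equals A's walk over the full stream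
theorem loopB_eq_sel (n t m p : Int) (answer : List Char) (pos : Int) (num : Int)
    (H : (answer.length : Int) < t ∨ t < 0) :
    loopB n t m p answer pos num = sel m p t (genFrom n (m * t) pos num) pos answer := by
  unfold loopB genFrom
  split
  · simp only [transNumber_ne_nil n num, ne_eq, not_false_eq_true, dite_true]
    have hs := sel_append m p t (transNumber n num)
      (genFrom n (m * t) (pos + (transNumber n num).length) (num + 1)) pos answer H
    rcases hr : (scanPiece m p t (transNumber n num) answer pos).2.2 with _ | _
    · have hgrow := hs.2 hr
      have h1 := hs.1
      rw [hr] at h1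
      simp only [Bool.false_eq_true, if_false] at h1
      simp only [hr, Bool.false_eq_true, dite_false]
      rw [h1, loopB_eq_sel n t m p _ _ (num + 1) hgrow]
      rw [scanPiece_pos m p t _ _ _ hr]
    · have h1 := hs.1
      rw [hr] at h1
      simp only [if_true] at h1
      simp only [hr, dite_true]
      exact h1.symm
  · simp [sel]
termination_by (m * t - pos).toNat
decreasing_by
  have hp := scanPiece_pos m p t (transNumber n num) answer pos hr
  have : 1 ≤ (transNumber n num).length := List.length_pos_iff.mpr (transNumber_ne_nil n num)
  omega

theorem solution_eq_alt (n t m p : Int) : solution n t m p = solution_alt n t m p := by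
  unfold solution solution_alt
  rw [buildResult_eq_genFrom]
  simp only [List.nil_append, List.length_nil, Nat.cast_zero]
  have hsel := selectLoop_eq_sel m p t (genFrom n (m * t) 0 0) 0 [] _ rfl
  simp only [Nat.cast_zero, List.drop_zero] at hsel
  rw [hsel]
  by_cases ht : t = 0
  · subst ht
    have h1 : loopB n 0 m p [] 0 0 = [] := by unfold loopB; simp
    have h2 : genFrom n (m * 0) 0 0 = [] := by unfold genFrom; simp
    rw [h1, h2]
    rfl
  · rw [loopB_eq_sel n t m p [] 0 0 (by simp; omega)]

-- ===== VERDICT (by name: the statement is the Claim_ definition above) =====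
theorem solution_spec : Claim_equal_solution := by
  intro n t m p _ _
  unfold Spec_solution
  exact solution_eq_alt n t m p
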